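-- pv_equiv track=rewrite | github.com/lsomoza6464/Yahtzee | calculate_choices.py | get_longest_streak
-- ===== SOURCE A (Python) =====
-- def get_longest_streak(roll_counts):
--     longest_streak = 0
--     curr_streak = 0
--     for count in roll_counts:
--         if count > 0:
--             curr_streak += 1
--             longest_streak = max(longest_streak, curr_streak)
--         else:
--             curr_streak = 0
--     return longest_streak
-- ===== SOURCE B (Python) =====
-- def get_longest_streak(roll_counts):
--     # barrier-gap method: every maximal run of positive counts is the gap between
--     # two consecutive "barriers" (non-positive positions, plus sentinels -1 and n)
--     n = len(roll_counts)
--     barriers = [-1] + [i for i, c in enumerate(roll_counts) if c <= 0] + [n]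
--     # barriers has >= 2 entries, so the generator is never empty
--     return max(b - a - 1 for a, b in zip(barriers, barriers[1:]))
-- ===== Notes on version B (the rewrite author's own statement) =====
-- stated objective: alternative
-- what changed: Replaces the running-streak counter with a barrier-gap computation: collect the indices of non-positive counts (with sentinels -1 and n) and return the maximum gap between consecutive barriers minus one.
import Mathlib
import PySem

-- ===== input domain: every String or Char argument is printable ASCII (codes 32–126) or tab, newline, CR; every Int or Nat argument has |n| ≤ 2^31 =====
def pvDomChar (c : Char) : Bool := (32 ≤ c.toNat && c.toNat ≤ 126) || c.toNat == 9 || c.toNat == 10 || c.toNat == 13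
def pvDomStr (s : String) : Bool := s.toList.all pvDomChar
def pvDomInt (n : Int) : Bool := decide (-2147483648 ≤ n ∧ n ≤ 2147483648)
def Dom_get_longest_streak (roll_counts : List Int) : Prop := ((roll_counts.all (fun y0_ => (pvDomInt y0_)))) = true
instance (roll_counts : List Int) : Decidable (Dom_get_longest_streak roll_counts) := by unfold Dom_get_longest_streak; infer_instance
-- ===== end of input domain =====

-- B replaces A's running-streak counter with a barrier-gap computation:
-- collect the indices of non-positive counts (with sentinels -1 and n) and
-- return the maximum gap between consecutive barriers minus one.


-- ===== PORT A =====
-- loop state: (longest_streak, curr_streak)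
def pvStepA (s : Int × Int) (count : Int) : Int × Int :=
  if count > 0 then (max s.1 (s.2 + 1), s.2 + 1) else (s.1, 0)

def get_longest_streak (roll_counts : List Int) : Int :=
  (roll_counts.foldl pvStepA (0, 0)).1

-- ===== PORT B =====
def get_longest_streak_alt (roll_counts : List Int) : Int :=
  let n : Int := roll_counts.length
  let barriers : List Int :=
    [-1] ++ ((PySem.List.enumerate roll_counts).filter (fun ic => decide (ic.2 ≤ 0))).map (fun ic => ic.1) ++ [n]
  let gaps := (barriers.zip (PySem.List.slice barriers (some 1) none)).map (fun ab => ab.2 - ab.1 - 1)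
  -- barriers has at least two entries, so gaps is nonempty and the default of
  -- Python's max (which would raise on empty) is never used
  (PySem.List.max? gaps (fun x => x)).getD 0

-- ===== PRECONDITION & SPEC =====
def Spec_get_longest_streak (roll_counts : List Int) (out : Int) : Prop := out = get_longest_streak_alt roll_counts
instance (roll_counts : List Int) (out : Int) : Decidable (Spec_get_longest_streak roll_counts out) := by unfold Spec_get_longest_streak; infer_instance

-- ===== CLAIM (what is proved, stated in full; the proofs are below) =====
def Claim_equal_get_longest_streak : Prop := ∀ (roll_counts : List Int), Dom_get_longest_streak roll_counts → Spec_get_longest_streak roll_counts (get_longest_streak roll_counts)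

-- ===== LEMMAS AND PROOFS =====

-- indices (offset i) of the non-positive entries of the list
def barrIdx : List Int → Int → List Int
  | [], _ => []
  | x :: xs, i => if x ≤ 0 then i :: barrIdx xs (i + 1) else barrIdx xs (i + 1)

-- max over the gaps between consecutive barriers p, bs…, n, each minus one
def mg (p : Int) : List Int → Int → Int
  | [], n => n - p - 1
  | b :: bs, n => max (b - p - 1) (mg b bs n)

lemma mg_ge : ∀ (xs : List Int) (i p : Int),
    i - p - 1 ≤ mg p (barrIdx xs i) (i + xs.length) := by
  intro xs
  induction xs with
  | nil => intro i p; simp [barrIdx, mg]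
  | cons x xs ih =>
    intro i p
    by_cases hx : x ≤ 0
    · simp only [barrIdx, hx, if_true, mg]
      omega
    · simp only [barrIdx, hx, if_false, List.length_cons]
      have := ih (i + 1) p
      have harith : (i + 1) + (xs.length : Int) = i + ((xs.length : Int) + 1) := by omega
      rw [harith] at this
      push_cast
      omega

lemma keyA : ∀ (xs : List Int) (i p L : Int), p + 1 ≤ i → i - p - 1 ≤ L →
    (xs.foldl pvStepA (L, i - p - 1)).1 = max L (mg p (barrIdx xs i) (i + xs.length)) := by
  intro xs
  induction xs with
  | nil =>
    intro i p L hp hL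
    simp only [List.foldl_nil, barrIdx, mg, List.length_nil]
    omega
  | cons x xs ih =>
    intro i p L hp hL
    simp only [List.foldl_cons, pvStepA, List.length_cons]
    by_cases hx : x > 0
    · have hx' : ¬ x ≤ 0 := by omega
      simp only [hx, if_true, barrIdx, hx', if_false]
      have h1 : i - p - 1 + 1 = (i + 1) - p - 1 := by omega
      have h2 : (i + 1) - p - 1 ≤ max L ((i + 1) - p - 1) := le_max_right _ _
      have := ih (i + 1) p (max L (i - p - 1 + 1)) (by omega) (by omega)
      rw [h1] at this ⊢
      rw [this]
      have hmg := mg_ge xs (i + 1) p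
      have harith : (i + 1) + (xs.length : Int) = i + ((xs.length : Int) + 1) := by omega
      rw [harith] at hmg this ⊢
      push_cast at hmg this ⊢
      omega
    · have hx' : x ≤ 0 := by omega
      simp only [hx, if_false, barrIdx, hx', if_true, mg]
      have := ih (i + 1) i L (by omega) (by omega)
      have h0 : (i + 1) - i - 1 = 0 := by omega
      rw [h0] at this
      have harith : (i + 1) + (xs.length : Int) = i + ((xs.length : Int) + 1) := by omega
      rw [harith] at this
      push_cast at this ⊢
      rw [this]
      omega

-- the enumerate/filter/map comprehension computes exactly barrIdx
lemma enum_barrIdx : ∀ (xs : List Int) (s : Int),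
    ((PySem.List.enumerate xs s).filter (fun ic => decide (ic.2 ≤ 0))).map (fun ic => ic.1)
      = barrIdx xs s := by
  intro xs
  induction xs with
  | nil => intro s; simp [PySem.List.enumerate_nil, barrIdx]
  | cons x xs ih =>
    intro s
    rw [PySem.List.enumerate_cons]
    by_cases hx : x ≤ 0
    · simp [hx, barrIdx, ih]
    · simp [hx, barrIdx, ih]

-- gaps between consecutive elements of p :: l
def gl (p : Int) : List Int → List Int
  | [] => []
  | b :: bs => (b - p - 1) :: gl b bs

lemma zip_gl : ∀ (l : List Int) (p : Int),
    ((p :: l).zip l).map (fun ab => ab.2 - ab.1 - 1) = gl p l := by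
  intro l
  induction l with
  | nil => intro p; simp [gl]
  | cons b bs ih => intro p; simp only [List.zip_cons_cons, List.map_cons, gl, ih]

lemma foldl_gl : ∀ (bs : List Int) (p n L : Int),
    (gl p (bs ++ [n])).foldl max L = max L (mg p bs n) := by
  intro bs
  induction bs with
  | nil => intro p n L; simp [gl, mg]
  | cons b bs ih =>
    intro p n L
    simp only [List.cons_append, gl, List.foldl_cons, mg, ih]
    omega

lemma gl_cons (p b : Int) (bs : List Int) : gl p (b :: bs) = (b - p - 1) :: gl b bs := rfl

lemma altB : ∀ (xs : List Int),
    get_longest_streak_alt xs = mg (-1) (barrIdx xs 0) xs.length := by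
  intro xs
  simp only [get_longest_streak_alt]
  rw [PySem.List.slice_from_one]
  simp only [List.cons_append, List.tail_cons]
  rw [enum_barrIdx]
  rw [zip_gl]
  cases barrIdx xs 0 with
  | nil =>
    simp only [List.nil_append, gl, mg]
    rw [PySem.List.max?_id_cons]
    simp
  | cons b bs =>
    simp only [List.nil_append, List.cons_append, gl_cons]
    rw [PySem.List.max?_id_cons]
    simp only [Option.getD_some, mg]
    rw [foldl_gl]

-- ===== VERDICT (by name: the statement is the Claim_ definition above) =====
theorem get_longest_streak_spec : Claim_equal_get_longest_streak := by
  intro xs _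
  show get_longest_streak xs = get_longest_streak_alt xs
  rw [altB]
  unfold get_longest_streak
  have h := keyA xs 0 (-1) 0 (by omega) (by omega)
  have h0 : (0 : Int) - (-1) - 1 = 0 := by omega
  rw [h0] at h
  have hge := mg_ge xs 0 (-1)
  simp only [zero_add] at h hge
  rw [h]
  omega
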